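-- pv_equiv track=rewrite | github.com/manwar/perlweeklychallenge-club | challenge-329/sgreen/python/ch-2.py | nice_string
-- ===== SOURCE A (Python) =====
-- def is_nice_string(s: str) -> bool:
--     # Check that every letter has a matching letter in the opposite case
--     for letter in s:
--         if letter.islower() and letter.upper() not in s:
--             return False
--         if letter.isupper() and letter.lower() not in s:
--             return False
--     return True
--
-- def nice_string(input_string: str) -> str|None:
--     solution = None
--     # Calculate every combination of starting and ending positions
--     for start in range(len(input_string)-1):
--         for end in range(start+2, len(input_string)+1):
--             # See if this is a nice string
--             extract = input_string[start:end]
--             if is_nice_string(extract):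
--                 # If it is longer than the current nice string, update the solution variable
--                 if solution is None or len(solution) < len(extract):
--                     solution = extract
--
--     return solution
-- ===== SOURCE B (Python) =====
-- def nice_string(input_string):
--     # Divide and conquer: a letter whose opposite case is absent from a segment can
--     # never be inside a nice substring of that segment, so split at all such
--     # characters and recurse; pieces are visited left to right, keeping the
--     # leftmost longest nice segment of length >= 2.
--     s = input_string
--
--     def solve(lo, hi, best):
--         seg = s[lo:hi]
--         present = set(seg)
--         bad = [i for i in range(lo, hi)
--                if (s[i].upper() if s[i].islower() else s[i].lower()) not in present
--                and s[i].isalpha()]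
--         if not bad:
--             if hi - lo >= 2 and (best is None or len(best) < hi - lo):
--                 best = seg
--             return best
--         prev = lo
--         for b in bad:
--             best = solve(prev, b, best)
--             prev = b + 1
--         return solve(prev, hi, best)
--
--     return solve(0, len(s), None)
-- ===== Notes on version B (the rewrite author's own statement) =====
-- stated objective: faster
-- what changed: B replaces A's enumerate-every-substring-and-rescan search by divide and conquer: a letter whose opposite case is absent from a segment can lie in no nice substring of it, so B splits each segment at all such letters and recurses, visiting pieces left to right and keeping the leftmost longest nice segment of length >= 2.
import Mathlib
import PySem

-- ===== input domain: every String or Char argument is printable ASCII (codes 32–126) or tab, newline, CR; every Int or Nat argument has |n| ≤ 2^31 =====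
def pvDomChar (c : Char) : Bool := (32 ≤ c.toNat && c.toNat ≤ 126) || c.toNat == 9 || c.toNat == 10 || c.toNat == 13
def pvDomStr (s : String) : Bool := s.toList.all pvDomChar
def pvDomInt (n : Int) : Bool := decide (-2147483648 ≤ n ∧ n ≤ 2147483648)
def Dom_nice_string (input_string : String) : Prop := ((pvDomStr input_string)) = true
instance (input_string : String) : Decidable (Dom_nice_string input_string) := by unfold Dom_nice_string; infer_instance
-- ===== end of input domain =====

-- B replaces A's cubic scan of every substring by divide and conquer: a letter whose
-- opposite case is missing from a segment can lie in no nice substring of it, so B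
-- splits at all such letters and recurses, visiting pieces left to right (objective: faster).

-- ===== PORT A =====
-- literal port of is_nice_string: loop over the characters of t, membership tested in s
def is_nice_loop (t : List Char) (s : List Char) : Bool :=
  match t with
  | [] => true
  | c :: rest =>
    if PySem.Chars.islower c && !(s.contains (PySem.Chars.upperChar c)) then false
    else if PySem.Chars.isupper c && !(s.contains (PySem.Chars.lowerChar c)) then false
    else is_nice_loop rest s

def nice_string (input_string : String) : Option String :=
  let cs := input_string.toList
  let n : Int := (cs.length : Int)
  let sol : Option (List Char) :=
    (PySem.List.pyRange 0 (n - 1)).foldl (fun sol start =>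
      (PySem.List.pyRange (start + 2) (n + 1)).foldl (fun sol e =>
        let extract := PySem.List.slice cs (some start) (some e)
        if is_nice_loop extract extract then
          if (match sol with | none => true | some t => t.length < extract.length) then
            some extract
          else sol
        else sol) sol) none
  sol.map (fun l => String.ofList l)

-- ===== PORT B =====
-- c.upper() if c.islower() else c.lower()
def pvOpp (ch : Char) : Char :=
  if PySem.Chars.islower ch then PySem.Chars.upperChar ch else PySem.Chars.lowerChar ch

-- the recursive solve(lo, hi, best) of Source B; the loop `prev = lo; for b in bad: ...`
-- is the foldl over `bad` (attach and the getLast form of the final `prev` are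
-- termination devices only: after the loop prev = last bad index + 1)
def pvSolve (cs : List Char) (lo hi : Nat) (best : Option (List Char)) : Option (List Char) :=
  let seg := PySem.List.slice cs (some (lo : Int)) (some (hi : Int))
  let present := PySem.Set.ofList seg
  let bad := (List.range' lo (hi - lo)).filter (fun (i : Nat) =>
      !(present.contains (pvOpp (PySem.List.pyGetD cs (Int.ofNat i) ' '))) &&
      PySem.Chars.isalpha (PySem.List.pyGetD cs (Int.ofNat i) ' '))
  if hbad : bad = [] then
    if decide (2 ≤ hi - lo) && (match best with | none => true | some t => t.length < hi - lo) then
      some seg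
    else best
  else
    pvSolve cs (bad.getLast hbad + 1) hi
      (bad.attach.foldl
        (fun (st : Nat × Option (List Char)) b => (b.1 + 1, pvSolve cs st.1 b.1 st.2)) (lo, best)).2
termination_by (hi, hi - lo)
decreasing_by
  · have hb := b.2
    rw [List.mem_filter, List.mem_range'] at hb
    obtain ⟨⟨i, hi', hbi⟩, -⟩ := hb
    exact Prod.Lex.left _ _ (by omega)
  · have hb := List.getLast_mem hbad
    rw [List.mem_filter, List.mem_range'] at hb
    obtain ⟨⟨i, hi', hbi⟩, -⟩ := hb
    refine Prod.Lex.right _ ?_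
    change hi - (bad.getLast hbad + 1) < hi - lo
    omega

def nice_string_alt (input_string : String) : Option String :=
  (pvSolve input_string.toList 0 input_string.toList.length none).map (fun l => String.ofList l)

-- ===== PRECONDITION & SPEC =====
def Spec_nice_string (input_string : String) (out : Option String) : Prop := out = nice_string_alt input_string
instance (input_string : String) (out : Option String) : Decidable (Spec_nice_string input_string out) := by unfold Spec_nice_string; infer_instance

-- ===== CLAIM (what is proved, stated in full; the proofs are below) =====
def Claim_equal_nice_string : Prop := ∀ (input_string : String), Dom_nice_string input_string → Spec_nice_string input_string (nice_string input_string)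

-- ===== LEMMAS AND PROOFS =====

-- window cs[k:m]
def pvWin (cs : List Char) (k m : Nat) : List Char := (cs.drop k).take (m - k)

-- the common update step: consider the window cs[p.1:p.2] as a candidate
def pvUpd (cs : List Char) (sol : Option (List Char)) (p : Nat × Nat) : Option (List Char) :=
  if is_nice_loop (pvWin cs p.1 p.2) (pvWin cs p.1 p.2) then
    if (match sol with | none => true | some t => t.length < (pvWin cs p.1 p.2).length) then
      some (pvWin cs p.1 p.2)
    else sol
  else sol

-- all candidate index pairs (k, e), lo ≤ k, k + 2 ≤ e ≤ hi, in A's iteration order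
def pvWins (cs : List Char) (lo hi : Nat) : List (Nat × Nat) :=
  (List.range' lo (hi - lo)).flatMap (fun k => (List.range' (k + 2) (hi - k - 1)).map (fun e => (k, e)))

-- A's inner step, named for the proofs
def pvStepA (cs : List Char) (start : Int) (sol : Option (List Char)) (e : Int) : Option (List Char) :=
  let extract := PySem.List.slice cs (some start) (some e)
  if is_nice_loop extract extract then
    if (match sol with | none => true | some t => t.length < extract.length) then
      some extract
    else sol
  else sol

-- the check of Source B's `all(...)`, used only to state the niceness bridge
def pvAllMatched (seen : PySem.Set Char) : Bool :=
  seen.all (fun ch => !(PySem.Chars.isalpha ch) || seen.contains (pvOpp ch))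

lemma nice_string_eq (s : String) :
    nice_string s =
      (((PySem.List.pyRange 0 ((s.toList.length : Int) - 1)).foldl (fun sol start =>
        (PySem.List.pyRange (start + 2) ((s.toList.length : Int) + 1)).foldl
          (pvStepA s.toList start) sol) none).map (fun l => String.ofList l)) := rfl

lemma pvSlice_eq_pvWin (cs : List Char) (lo hi : Nat) :
    PySem.List.slice cs (some (lo : Int)) (some (hi : Int)) = pvWin cs lo hi := by
  rw [PySem.List.slice_toNat cs (by positivity) (by positivity)]
  simp [pvWin]

lemma isupper_not_islower {c : Char} (h : PySem.Chars.isupper c = true) :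
    PySem.Chars.islower c = false := by
  simp only [PySem.Chars.islower, PySem.Chars.isupper, Bool.and_eq_true, decide_eq_true_eq,
    Char.le_def, UInt32.le_iff_toNat_le, show ('A').val.toNat = 65 from rfl,
    show ('Z').val.toNat = 90 from rfl] at *
  simp only [Bool.and_eq_false_iff, decide_eq_false_iff_not, Char.le_def, UInt32.le_iff_toNat_le,
    show ('a').val.toNat = 97 from rfl, show ('z').val.toNat = 122 from rfl]
  omega

lemma is_nice_loop_iff (t s : List Char) :
    is_nice_loop t s = true ↔
      ∀ c ∈ t, (PySem.Chars.islower c = true → PySem.Chars.upperChar c ∈ s) ∧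
               (PySem.Chars.isupper c = true → PySem.Chars.lowerChar c ∈ s) := by
  induction t with
  | nil => simp [is_nice_loop]
  | cons c rest ih =>
    simp only [is_nice_loop, List.mem_cons]
    split_ifs with h1 h2
    · simp only [Bool.and_eq_true, Bool.not_eq_true', List.contains_eq_mem, decide_eq_false_iff_not] at h1
      constructor
      · intro h; cases h
      · intro h
        exact absurd ((h c (Or.inl rfl)).1 h1.1) h1.2
    · simp only [Bool.and_eq_true, Bool.not_eq_true', List.contains_eq_mem, decide_eq_false_iff_not] at h2
      constructor
      · intro h; cases h
      · intro h
        exact absurd ((h c (Or.inl rfl)).2 h2.1) h2.2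
    · rw [ih]
      simp only [Bool.and_eq_true, Bool.not_eq_true', List.contains_eq_mem, decide_eq_false_iff_not, not_and] at h1 h2
      constructor
      · intro h
        refine fun d hd => hd.elim (fun e => e ▸ ⟨fun hl => ?_, fun hu => ?_⟩) (h d)
        · by_contra hm; exact (h1 hl) hm
        · by_contra hm; exact (h2 hu) hm
      · intro h d hd; exact h d (Or.inr hd)

lemma pvAllMatched_iff (S : List Char) :
    pvAllMatched S = true ↔ ∀ c ∈ S, PySem.Chars.isalpha c = true → pvOpp c ∈ S := by
  simp [pvAllMatched, List.all_eq_true, List.contains_eq_mem]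
  refine ⟨fun h c hc ha => ?_, fun h c hc => ?_⟩
  · rcases h c hc with hf | hm
    · rw [ha] at hf; cases hf
    · exact hm
  · by_cases ha : PySem.Chars.isalpha c = true
    · exact Or.inr (h c hc ha)
    · exact Or.inl (by simpa using ha)

-- membership-equal collections give the same verdict
lemma check_equiv {S w : List Char} (h : ∀ x, x ∈ S ↔ x ∈ w) :
    pvAllMatched S = is_nice_loop w w := by
  rw [Bool.eq_iff_iff, pvAllMatched_iff, is_nice_loop_iff]
  constructor
  · intro hall c hc
    have hcS : c ∈ S := (h c).mpr hc
    constructor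
    · intro hl
      have ha : PySem.Chars.isalpha c = true := by simp [PySem.Chars.isalpha, hl]
      have := hall c hcS ha
      rw [pvOpp, if_pos hl] at this
      exact (h _).mp this
    · intro hu
      have ha : PySem.Chars.isalpha c = true := by simp [PySem.Chars.isalpha, hu]
      have := hall c hcS ha
      rw [pvOpp, if_neg (by simp [isupper_not_islower hu])] at this
      exact (h _).mp this
  · intro hall c hc ha
    have hcw : c ∈ w := (h c).mp hc
    rcases Bool.or_eq_true_iff.mp ha with hu | hl
    · rw [pvOpp, if_neg (by simp [isupper_not_islower hu])]
      exact (h _).mpr ((hall c hcw).2 hu)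
    · rw [pvOpp, if_pos hl]
      exact (h _).mpr ((hall c hcw).1 hl)

lemma pvWin_length (cs : List Char) (k m : Nat) (hk : k ≤ m) (hm : m ≤ cs.length) :
    (pvWin cs k m).length = m - k := by
  simp [pvWin]; omega

lemma pvWin_mem (cs : List Char) (lo hi : Nat) (hhN : hi ≤ cs.length) (x : Char) :
    x ∈ pvWin cs lo hi ↔ ∃ i, lo ≤ i ∧ i < hi ∧ cs.getD i ' ' = x := by
  unfold pvWin
  constructor
  · intro hx
    obtain ⟨j, hj, hget⟩ := List.mem_iff_getElem.mp hx
    have hjlen : j < hi - lo ∧ j < cs.length - lo := by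
      simp only [List.length_take, List.length_drop, lt_min_iff] at hj
      omega
    refine ⟨lo + j, by omega, by omega, ?_⟩
    rw [List.getElem_take, List.getElem_drop] at hget
    rw [List.getD_eq_getElem cs ' ' (by omega)]
    exact hget
  · rintro ⟨i, hli, hih, hget⟩
    have hiN : i < cs.length := by omega
    rw [List.getD_eq_getElem cs ' ' hiN] at hget
    apply List.mem_iff_getElem.mpr
    refine ⟨i - lo, by simp only [List.length_take, List.length_drop, lt_min_iff]; omega, ?_⟩
    rw [List.getElem_take, List.getElem_drop]
    simp only [show lo + (i - lo) = i from by omega]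
    exact hget

lemma pvWin_subset (cs : List Char) {lo hi k e : Nat} (hhN : hi ≤ cs.length)
    (hk : lo ≤ k) (he : e ≤ hi) : ∀ x ∈ pvWin cs k e, x ∈ pvWin cs lo hi := by
  intro x hx
  obtain ⟨i, h1, h2, h3⟩ := (pvWin_mem cs k e (by omega) x).mp hx
  exact (pvWin_mem cs lo hi hhN x).mpr ⟨i, by omega, by omega, h3⟩

-- fold no-ops
lemma foldl_upd_not_nice (cs : List Char) (L : List (Nat × Nat)) (sol : Option (List Char))
    (h : ∀ p ∈ L, is_nice_loop (pvWin cs p.1 p.2) (pvWin cs p.1 p.2) = false) :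
    L.foldl (pvUpd cs) sol = sol := by
  induction L generalizing sol with
  | nil => rfl
  | cons p L ih =>
    have hp := h p List.mem_cons_self
    simp only [List.foldl_cons]
    rw [show pvUpd cs sol p = sol by unfold pvUpd; rw [if_neg (by simp [hp])]]
    exact ih sol (fun q hq => h q (List.mem_cons_of_mem _ hq))

lemma foldl_upd_short (cs : List Char) (L : List (Nat × Nat)) (t : List Char)
    (h : ∀ p ∈ L, (pvWin cs p.1 p.2).length ≤ t.length) :
    L.foldl (pvUpd cs) (some t) = some t := by
  induction L with
  | nil => rfl
  | cons p L ih =>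
    have hp := h p List.mem_cons_self
    simp only [List.foldl_cons]
    have hstep : pvUpd cs (some t) p = some t := by
      unfold pvUpd
      split_ifs with h1 h2
      · exact absurd (of_decide_eq_true (h2 : decide (t.length < (pvWin cs p.1 p.2).length) = true)) (by omega)
      · rfl
      · rfl
    rw [hstep]
    exact ih (fun q hq => h q (List.mem_cons_of_mem _ hq))

lemma foldl_upd_mem (cs : List Char) (L : List (Nat × Nat)) (sol : Option (List Char)) :
    L.foldl (pvUpd cs) sol = sol ∨ ∃ p ∈ L, L.foldl (pvUpd cs) sol = some (pvWin cs p.1 p.2) := by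
  induction L generalizing sol with
  | nil => exact Or.inl rfl
  | cons p L ih =>
    simp only [List.foldl_cons]
    have hstep : pvUpd cs sol p = sol ∨ pvUpd cs sol p = some (pvWin cs p.1 p.2) := by
      unfold pvUpd
      split_ifs
      · exact Or.inr rfl
      · exact Or.inl rfl
      · exact Or.inl rfl
    rcases ih (pvUpd cs sol p) with h | ⟨q, hq, hfq⟩
    · rw [h]
      rcases hstep with h' | h'
      · exact Or.inl h'
      · exact Or.inr ⟨p, List.mem_cons_self, h'⟩
    · exact Or.inr ⟨q, List.mem_cons_of_mem _ hq, hfq⟩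

lemma pvWins_nil (cs : List Char) (lo hi : Nat) (h : hi ≤ lo + 1) : pvWins cs lo hi = [] := by
  unfold pvWins
  rw [List.flatMap_eq_nil_iff]
  intro k hk
  obtain ⟨i, hi', hki⟩ := List.mem_range'.mp hk
  rw [show hi - k - 1 = 0 by omega]
  rfl

-- a segment with no bad character: the fold keeps the whole segment iff it is longer
lemma fold_nice_seg (cs : List Char) (lo hi : Nat) (hlh : lo ≤ hi) (hhN : hi ≤ cs.length)
    (hnice : is_nice_loop (pvWin cs lo hi) (pvWin cs lo hi) = true) (sol : Option (List Char)) :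
    (pvWins cs lo hi).foldl (pvUpd cs) sol =
      if decide (2 ≤ hi - lo) && (match sol with | none => true | some t => t.length < hi - lo) then
        some (pvWin cs lo hi)
      else sol := by
  by_cases hlen : 2 ≤ hi - lo
  · have hwlen : (pvWin cs lo hi).length = hi - lo := pvWin_length cs lo hi hlh hhN
    have houter : List.range' lo (hi - lo) = lo :: List.range' (lo + 1) (hi - lo - 1) := by
      conv_lhs => rw [show hi - lo = (hi - lo - 1) + 1 by omega, List.range'_succ]
    have hg1 : List.range' (lo + 2) (hi - lo - 1) = List.range' (lo + 2) (hi - lo - 2) ++ [hi] := by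
      conv_lhs => rw [show hi - lo - 1 = (hi - lo - 2) + 1 by omega, List.range'_concat]
      simp
      omega
    unfold pvWins
    rw [houter, List.flatMap_cons, hg1, List.map_append]
    simp only [List.map_cons, List.map_nil]
    set L1 := (List.range' (lo + 2) (hi - lo - 2)).map (fun e => (lo, e)) with hL1def
    set L2 := (List.range' (lo + 1) (hi - lo - 1)).flatMap
      (fun k => (List.range' (k + 2) (hi - k - 1)).map (fun e => (k, e))) with hL2def
    have hL1 : ∀ p ∈ L1, (pvWin cs p.1 p.2).length < hi - lo := by
      intro p hp
      rw [hL1def, List.mem_map] at hp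
      obtain ⟨e, he, rfl⟩ := hp
      obtain ⟨i, hi', hei⟩ := List.mem_range'.mp he
      rw [pvWin_length cs lo e (by omega) (by omega)]
      omega
    have hL2 : ∀ p ∈ L2, (pvWin cs p.1 p.2).length < hi - lo := by
      intro p hp
      rw [hL2def, List.mem_flatMap] at hp
      obtain ⟨k, hk, hpk⟩ := hp
      obtain ⟨i, hi', hki⟩ := List.mem_range'.mp hk
      rw [List.mem_map] at hpk
      obtain ⟨e, he, rfl⟩ := hpk
      obtain ⟨j, hj', hej⟩ := List.mem_range'.mp he
      rw [pvWin_length cs k e (by omega) (by omega)]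
      omega
    have hmid : ∀ (sol' : Option (List Char)),
        (∀ t, sol' = some t → t.length < hi - lo) →
        pvUpd cs sol' (lo, hi) = some (pvWin cs lo hi) := by
      intro sol' hsol'
      unfold pvUpd
      rw [if_pos hnice]
      cases sol' with
      | none => rfl
      | some t =>
        rw [if_pos]
        show decide (t.length < (pvWin cs lo hi).length) = true
        rw [hwlen]
        exact decide_eq_true (hsol' t rfl)
    rw [List.foldl_append, List.foldl_append, List.foldl_cons, List.foldl_nil]
    by_cases hcond : (match sol with | none => true | some t => decide (t.length < hi - lo)) = true
    · -- the full window replaces whatever the earlier candidates produced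
      have hsolsmall : ∀ t, List.foldl (pvUpd cs) sol L1 = some t → t.length < hi - lo := by
        intro t hft
        rcases foldl_upd_mem cs L1 sol with hkeep | ⟨p, hp, hfp⟩
        · rw [hkeep] at hft
          cases sol with
          | none => cases hft
          | some u =>
            cases hft
            exact of_decide_eq_true hcond
        · rw [hfp] at hft
          cases hft
          exact hL1 p hp
      rw [hmid _ hsolsmall]
      rw [foldl_upd_short cs L2 (pvWin cs lo hi) (fun p hp => by have := hL2 p hp; omega)]
      rw [if_pos]
      simp only [Bool.and_eq_true, decide_eq_true_iff]
      exact ⟨hlen, hcond⟩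
    · -- sol is already at least as long as every candidate
      obtain ⟨t, rfl⟩ : ∃ t, sol = some t := by
        cases sol with
        | none => simp at hcond
        | some t => exact ⟨t, rfl⟩
      have ht : ¬ (t.length < hi - lo) := by
        intro hc
        exact hcond (by simpa using hc)
      have hshort : ∀ p ∈ L1 ++ [(lo, hi)] ++ L2, (pvWin cs p.1 p.2).length ≤ t.length := by
        intro p hp
        rcases List.mem_append.mp hp with hp' | hp'
        · rcases List.mem_append.mp hp' with hp'' | hp''
          · have := hL1 p hp''; omega
          · rcases List.mem_singleton.mp hp'' with rfl
            simp only []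
            rw [pvWin_length cs lo hi hlh hhN]
            omega
        · have := hL2 p hp'; omega
      have := foldl_upd_short cs (L1 ++ [(lo, hi)] ++ L2) t hshort
      rw [List.foldl_append, List.foldl_append, List.foldl_cons, List.foldl_nil] at this
      rw [this]
      rw [if_neg]
      simp only [Bool.and_eq_true, not_and, decide_eq_true_iff]
      intro _
      simpa using ht
  · rw [pvWins_nil cs lo hi (by omega), List.foldl_nil, if_neg]
    simp [hlen]

-- the port's bad list is empty exactly when the segment is nice
lemma bad_nil_iff (cs : List Char) (lo hi : Nat) (hlh : lo ≤ hi) (hhN : hi ≤ cs.length) :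
    ((List.range' lo (hi - lo)).filter (fun (i : Nat) =>
        !((PySem.Set.ofList (PySem.List.slice cs (some (lo : Int)) (some (hi : Int)))).contains
            (pvOpp (PySem.List.pyGetD cs (Int.ofNat i) ' '))) &&
        PySem.Chars.isalpha (PySem.List.pyGetD cs (Int.ofNat i) ' ')) = []) ↔
      is_nice_loop (pvWin cs lo hi) (pvWin cs lo hi) = true := by
  have hg : ∀ i : Nat, PySem.List.pyGetD cs (Int.ofNat i) ' ' = cs.getD i ' ' :=
    fun i => PySem.List.pyGetD_natCast cs i ' '
  have hmm : ∀ x : Char,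
      ((PySem.Set.ofList (PySem.List.slice cs (some (lo : Int)) (some (hi : Int)))).contains x = true)
        ↔ x ∈ pvWin cs lo hi := by
    intro x
    simp only [PySem.Set.contains, List.contains_eq_mem, decide_eq_true_iff, PySem.Set.mem_ofList, pvSlice_eq_pvWin]
  rw [List.filter_eq_nil_iff]
  rw [← check_equiv (fun x => Iff.rfl : ∀ x, x ∈ pvWin cs lo hi ↔ x ∈ pvWin cs lo hi),
    pvAllMatched_iff]
  constructor
  · intro h c hc ha
    obtain ⟨i, h1, h2, h3⟩ := (pvWin_mem cs lo hi hhN c).mp hc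
    have := h i (List.mem_range'.mpr ⟨i - lo, by omega, by omega⟩)
    rw [hg, h3] at this
    simp only [Bool.and_eq_true, Bool.not_eq_true', not_and] at this
    rcases Bool.not_eq_true _ ▸ fun hcontra => this hcontra ha with hne
    have hcf : ((PySem.Set.ofList (PySem.List.slice cs (some (lo : Int)) (some (hi : Int)))).contains (pvOpp c)) = true := by
      by_contra hcc
      exact absurd ha (by simpa using this (by simpa using hcc))
    exact (hmm _).mp hcf
  · intro h i hi'
    obtain ⟨j, hj, hij⟩ := List.mem_range'.mp hi'
    have hiN : lo ≤ i ∧ i < hi := by omega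
    simp only [hg, Bool.and_eq_true, Bool.not_eq_true', not_and]
    intro hcont
    have hcmem : cs.getD i ' ' ∈ pvWin cs lo hi :=
      (pvWin_mem cs lo hi hhN _).mpr ⟨i, hiN.1, hiN.2, rfl⟩
    intro ha
    have := h _ hcmem ha
    rw [← hmm _] at this
    rw [this] at hcont
    cases hcont

-- no nice window crosses a bad index
lemma nonNice_of_bad (cs : List Char) (lo₀ hi b : Nat) (hhN : hi ≤ cs.length)
    (halpha : PySem.Chars.isalpha (cs.getD b ' ') = true)
    (hopp : pvOpp (cs.getD b ' ') ∉ pvWin cs lo₀ hi) :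
    ∀ k e, lo₀ ≤ k → k ≤ b → b < e → e ≤ hi →
      is_nice_loop (pvWin cs k e) (pvWin cs k e) = false := by
  intro k e hlok hkb hbe hehi
  have hcmem : cs.getD b ' ' ∈ pvWin cs k e :=
    (pvWin_mem cs k e (by omega) _).mpr ⟨b, hkb, hbe, rfl⟩
  rw [Bool.eq_false_iff]
  intro hn
  have hall := (is_nice_loop_iff _ _).mp hn
  rcases Bool.or_eq_true_iff.mp halpha with hu | hl
  · have hmem := (hall _ hcmem).2 hu
    have hmem' : PySem.Chars.lowerChar (cs.getD b ' ') ∈ pvWin cs lo₀ hi :=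
      pvWin_subset cs hhN hlok hehi _ hmem
    rw [pvOpp, if_neg (by rw [isupper_not_islower hu]; simp)] at hopp
    exact hopp hmem'
  · have hmem := (hall _ hcmem).1 hl
    have hmem' : PySem.Chars.upperChar (cs.getD b ' ') ∈ pvWin cs lo₀ hi :=
      pvWin_subset cs hhN hlok hehi _ hmem
    rw [pvOpp, if_pos hl] at hopp
    exact hopp hmem'

-- splitting the candidate fold at a crossing-free index
lemma fold_split (cs : List Char) (lo b hi : Nat) (hlo : lo ≤ b) (hbh : b < hi) (hhN : hi ≤ cs.length)
    (hcross : ∀ k e, lo ≤ k → k ≤ b → b < e → e ≤ hi →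
      is_nice_loop (pvWin cs k e) (pvWin cs k e) = false) (sol : Option (List Char)) :
    (pvWins cs lo hi).foldl (pvUpd cs) sol =
      (pvWins cs (b + 1) hi).foldl (pvUpd cs) ((pvWins cs lo b).foldl (pvUpd cs) sol) := by
  unfold pvWins
  have houter : List.range' lo (hi - lo) = List.range' lo (b - lo) ++ List.range' b (hi - b) := by
    rw [show hi - lo = (b - lo) + (hi - b) by omega, ← List.range'_append,
      show lo + 1 * (b - lo) = b by omega]
  have hinner : List.range' b (hi - b) = b :: List.range' (b + 1) (hi - b - 1) := by
    conv_lhs => rw [show hi - b = (hi - b - 1) + 1 by omega, List.range'_succ]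
  rw [houter, hinner, List.flatMap_append, List.flatMap_cons, List.foldl_append, List.foldl_append]
  rw [foldl_upd_not_nice cs ((List.range' (b + 2) (hi - b - 1)).map (fun e => (b, e))) _ (by
    intro p hp
    rw [List.mem_map] at hp
    obtain ⟨e, he, rfl⟩ := hp
    obtain ⟨j, hj', hej⟩ := List.mem_range'.mp he
    exact hcross b e (by omega) (by omega) (by omega) (by omega))]
  rw [show hi - (b + 1) = hi - b - 1 by omega]
  congr 1
  rw [List.foldl_flatMap, List.foldl_flatMap]
  apply PySem.List.foldl_congr_mem
  intro acc k hk
  obtain ⟨i, hi', hki⟩ := List.mem_range'.mp hk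
  have hsplit : List.range' (k + 2) (hi - k - 1)
      = List.range' (k + 2) (b - k - 1) ++ List.range' (b + 1) (hi - b) := by
    rw [show hi - k - 1 = (b - k - 1) + (hi - b) by omega, ← List.range'_append,
      show k + 2 + 1 * (b - k - 1) = b + 1 by omega]
  rw [hsplit, List.map_append, List.foldl_append]
  rw [foldl_upd_not_nice cs ((List.range' (b + 1) (hi - b)).map (fun e => (k, e))) _ (by
    intro p hp
    rw [List.mem_map] at hp
    obtain ⟨e, he, rfl⟩ := hp
    obtain ⟨j, hj', hej⟩ := List.mem_range'.mp he
    exact hcross k e (by omega) (by omega) (by omega) (by omega))]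

-- threading the pieces loop
lemma thread (cs : List Char) (hi lo₀ : Nat)
    (Hsolve : ∀ l h s, h < hi → l ≤ h → h ≤ cs.length →
      pvSolve cs l h s = (pvWins cs l h).foldl (pvUpd cs) s) :
    ∀ (L : List Nat) (lo : Nat) (sol : Option (List Char)),
      L.Pairwise (· < ·) → (∀ x ∈ L, lo ≤ x ∧ x < hi) → lo₀ ≤ lo → hi ≤ cs.length →
      (∀ x ∈ L, ∀ k e, lo₀ ≤ k → k ≤ x → x < e → e ≤ hi →
        is_nice_loop (pvWin cs k e) (pvWin cs k e) = false) →
      (L.foldl (fun st b => (b + 1, pvSolve cs st.1 b st.2)) (lo, sol)).1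
          = (match L.getLast? with | none => lo | some b => b + 1)
      ∧ (pvWins cs (((L.foldl (fun st b => (b + 1, pvSolve cs st.1 b st.2)) (lo, sol))).1) hi).foldl
            (pvUpd cs) ((L.foldl (fun st b => (b + 1, pvSolve cs st.1 b st.2)) (lo, sol)).2)
          = (pvWins cs lo hi).foldl (pvUpd cs) sol := by
  intro L
  induction L with
  | nil => exact fun lo sol _ _ _ _ _ => ⟨rfl, rfl⟩
  | cons b T ih =>
    intro lo sol hpw hbound hlo₀ hN hcross
    have hb := hbound b List.mem_cons_self
    have hsol : pvSolve cs lo b sol = (pvWins cs lo b).foldl (pvUpd cs) sol :=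
      Hsolve lo b sol (by omega) (by omega) (by omega)
    have hrel : ∀ x ∈ T, b < x := fun x hx => List.rel_of_pairwise_cons hpw hx
    have hIH := ih (b + 1) (pvSolve cs lo b sol) (List.Pairwise.of_cons hpw)
      (fun x hx => ⟨by have := hrel x hx; omega, (hbound x (List.mem_cons_of_mem _ hx)).2⟩)
      (by omega) hN
      (fun x hx => hcross x (List.mem_cons_of_mem _ hx))
    simp only [List.foldl_cons]
    refine ⟨?_, ?_⟩
    · rw [hIH.1]
      cases T with
      | nil => rfl
      | cons c T' =>
        rw [List.getLast?_cons_cons]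
        cases h : (c :: T').getLast? with
        | none => exact absurd h (by simp)
        | some x => rfl
    · rw [hIH.2, hsol]
      rw [← fold_split cs lo b hi hb.1 hb.2 hN
        (fun k e hk1 hk2 he1 he2 =>
          hcross b List.mem_cons_self k e (by omega) hk2 he1 he2) sol]

lemma foldl_attach_pv (cs : List Char) (L : List Nat) (init : Nat × Option (List Char)) :
    L.attach.foldl (fun st b => (b.1 + 1, pvSolve cs st.1 b.1 st.2)) init
      = L.foldl (fun st b => (b + 1, pvSolve cs st.1 b st.2)) init :=
  List.foldl_attach (f := fun st b => (b + 1, pvSolve cs st.1 b st.2))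

-- the divide-and-conquer recursion computes the brute-force fold
lemma solve_eq (cs : List Char) : ∀ (hi span lo : Nat) (sol : Option (List Char)),
    hi - lo = span → lo ≤ hi → hi ≤ cs.length →
    pvSolve cs lo hi sol = (pvWins cs lo hi).foldl (pvUpd cs) sol := by
  intro hi
  induction hi using Nat.strong_induction_on with
  | _ hi IH1 =>
  intro span
  induction span using Nat.strong_induction_on with
  | _ span IH2 =>
  intro lo sol hspan hlh hhN
  rw [pvSolve.eq_def]
  by_cases hbad : (List.range' lo (hi - lo)).filter (fun (i : Nat) =>
      !((PySem.Set.ofList (PySem.List.slice cs (some (lo : Int)) (some (hi : Int)))).contains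
          (pvOpp (PySem.List.pyGetD cs (Int.ofNat i) ' '))) &&
      PySem.Chars.isalpha (PySem.List.pyGetD cs (Int.ofNat i) ' ')) = []
  · rw [dif_pos hbad]
    have hnice := (bad_nil_iff cs lo hi hlh hhN).mp hbad
    rw [fold_nice_seg cs lo hi hlh hhN hnice sol, pvSlice_eq_pvWin]
  · rw [dif_neg hbad]
    rw [foldl_attach_pv]
    have hg : ∀ i : Nat, PySem.List.pyGetD cs (Int.ofNat i) ' ' = cs.getD i ' ' :=
      fun i => PySem.List.pyGetD_natCast cs i ' '
    revert hbad
    generalize hXdef : (List.range' lo (hi - lo)).filter (fun (i : Nat) =>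
      !((PySem.Set.ofList (PySem.List.slice cs (some (lo : Int)) (some (hi : Int)))).contains
          (pvOpp (PySem.List.pyGetD cs (Int.ofNat i) ' '))) &&
      PySem.Chars.isalpha (PySem.List.pyGetD cs (Int.ofNat i) ' ')) = bad
    intro hbad
    have hpw : bad.Pairwise (· < ·) := hXdef ▸ (List.pairwise_lt_range' 1).filter _
    have hbound : ∀ x ∈ bad, lo ≤ x ∧ x < hi := by
      intro x hx
      rw [← hXdef, List.mem_filter] at hx
      obtain ⟨i, hi', hxi⟩ := List.mem_range'.mp hx.1
      omega
    have hcross : ∀ x ∈ bad, ∀ k e, lo ≤ k → k ≤ x → x < e → e ≤ hi →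
        is_nice_loop (pvWin cs k e) (pvWin cs k e) = false := by
      intro x hx
      rw [← hXdef, List.mem_filter] at hx
      have hprop := hx.2
      simp only [hg, Bool.and_eq_true, Bool.not_eq_true'] at hprop
      apply nonNice_of_bad cs lo hi x hhN hprop.2
      intro hmem
      have hcc : ((PySem.Set.ofList (PySem.List.slice cs (some (lo : Int)) (some (hi : Int)))).contains
          (pvOpp (cs.getD x ' '))) = true := by
        simp only [PySem.Set.contains, List.contains_eq_mem, decide_eq_true_iff,
          PySem.Set.mem_ofList, pvSlice_eq_pvWin]
        exact hmem
      rw [hcc] at hprop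
      cases hprop.1
    have Hsolve : ∀ l h s, h < hi → l ≤ h → h ≤ cs.length →
        pvSolve cs l h s = (pvWins cs l h).foldl (pvUpd cs) s :=
      fun l h s hh hlh' hhN' => IH1 h hh (h - l) l s rfl hlh' hhN'
    have hth := thread cs hi lo Hsolve bad lo sol hpw hbound (le_refl lo) hhN hcross
    have hne : lo < hi := by
      obtain ⟨x, hx⟩ := List.exists_mem_of_ne_nil bad hbad
      have := hbound x hx
      omega
    have hlast := hbound (bad.getLast hbad) (List.getLast_mem hbad)
    have hlast1 : (bad.foldl (fun st b => (b + 1, pvSolve cs st.1 b st.2)) (lo, sol)).1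
        = bad.getLast hbad + 1 := by
      rw [hth.1, List.getLast?_eq_getLast hbad]
    rw [IH2 (hi - (bad.getLast hbad + 1)) (by omega) (bad.getLast hbad + 1)
      ((bad.foldl (fun st b => (b + 1, pvSolve cs st.1 b st.2)) (lo, sol)).2) rfl (by omega) hhN]
    rw [← hlast1]
    exact hth.2

-- A's inner loop is the fold of pvUpd over its group of candidates
lemma a_inner (cs : List Char) (k : Nat) : ∀ (t j : Nat) (sol : Option (List Char)),
    j + t = cs.length + 1 →
    (PySem.List.pyRange (j : Int) ((cs.length : Int) + 1)).foldl (pvStepA cs (k : Int)) sol =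
      ((List.range' j t).map (fun e => (k, e))).foldl (pvUpd cs) sol := by
  intro t
  induction t with
  | zero =>
    intro j sol hj
    have hj' : j = cs.length + 1 := by omega
    subst hj'
    rw [show ((cs.length + 1 : Nat) : Int) = (cs.length : Int) + 1 by push_cast; ring]
    simp [PySem.List.pyRange]
  | succ t ih =>
    intro j sol hj
    have hjN : j ≤ cs.length := by omega
    rw [PySem.List.pyRange_one_cons (by exact_mod_cast (by omega : j < cs.length + 1)),
      List.range'_succ, List.map_cons, List.foldl_cons, List.foldl_cons]
    have hstep : pvStepA cs (k : Int) sol (j : Int) = pvUpd cs sol (k, j) := by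
      simp only [pvStepA, pvUpd, pvSlice_eq_pvWin]
    rw [hstep, show ((j : Int) + 1) = ((j + 1 : Nat) : Int) by push_cast; ring]
    exact ih (j + 1) _ (by omega)

-- A is the brute-force fold
lemma a_eq (s : String) :
    nice_string s = ((pvWins s.toList 0 s.toList.length).foldl (pvUpd s.toList) none).map
      (fun l => String.ofList l) := by
  rw [nice_string_eq]
  congr 1
  set cs := s.toList with hcs
  set N := cs.length with hN
  by_cases hN0 : N = 0
  · rw [hN0, pvWins_nil cs 0 0 (by omega)]
    simp [PySem.List.pyRange]
  · rw [show ((N : Int) - 1) = ((N - 1 : Nat) : Int) by omega, PySem.List.pyRange_zero_natCast,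
      List.foldl_map]
    rw [PySem.List.foldl_congr_mem _ _
      (fun (sol : Option (List Char)) (k : Nat) =>
        ((List.range' (k + 2) (N - k - 1)).map (fun e => (k, e))).foldl (pvUpd cs) sol)
      none
      (by
        intro acc k hk
        rw [List.mem_range] at hk
        rw [show ((k : Int) + 2) = ((k + 2 : Nat) : Int) by push_cast; ring]
        exact a_inner cs k (N - k - 1) (k + 2) acc (by omega))]
    rw [← List.foldl_flatMap]
    congr 1
    unfold pvWins
    rw [Nat.sub_zero]
    have houter : List.range' 0 N = List.range' 0 (N - 1) ++ [N - 1] := by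
      conv_lhs => rw [show N = (N - 1) + 1 by omega, List.range'_concat]
      simp
    rw [houter, List.flatMap_append, List.range_eq_range']
    have hlast : ([N - 1] : List Nat).flatMap
        (fun k => (List.range' (k + 2) (N - k - 1)).map (fun e => (k, e))) = [] := by
      simp only [List.flatMap_cons, List.flatMap_nil, List.append_nil]
      rw [show N - (N - 1) - 1 = 0 by omega]
      rfl
    rw [hlast, List.append_nil]

-- ===== VERDICT (by name: the statement is the Claim_ definition above) =====
theorem nice_string_spec : Claim_equal_nice_string := by
  intro s _
  show nice_string s = nice_string_alt s
  rw [a_eq, nice_string_alt,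
    solve_eq s.toList s.toList.length s.toList.length 0 none (by omega) (by omega) (le_refl _)]
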